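-- pv_equiv track=rewrite | github.com/Debasish6/ML_Django | OCR_Recognition/OCR_Image_App/preprocessing.py | structured_text
-- ===== SOURCE A (Python) =====
-- def structured_text(text):
--     lines = dict()
--     i=0
--     w=''
--     for line in text:
--         w = w+line
--         if line == "\n":
--             lines[i]=w
--             i=i+1
--             w=''
--     return lines
-- ===== SOURCE B (Python) =====
-- def structured_text(text):
--     parts = text.split("\n")
--     return {i: s + "\n" for i, s in enumerate(parts[:-1])}
-- ===== Notes on version B (the rewrite author's own statement) =====
-- stated objective: simpler
-- what changed: Replaced A's character-by-character scan with a mutable line accumulator by a single split on newline plus an enumerate comprehension over whole line segments, reattaching the terminator and dropping the unterminated tail.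
import Mathlib
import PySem

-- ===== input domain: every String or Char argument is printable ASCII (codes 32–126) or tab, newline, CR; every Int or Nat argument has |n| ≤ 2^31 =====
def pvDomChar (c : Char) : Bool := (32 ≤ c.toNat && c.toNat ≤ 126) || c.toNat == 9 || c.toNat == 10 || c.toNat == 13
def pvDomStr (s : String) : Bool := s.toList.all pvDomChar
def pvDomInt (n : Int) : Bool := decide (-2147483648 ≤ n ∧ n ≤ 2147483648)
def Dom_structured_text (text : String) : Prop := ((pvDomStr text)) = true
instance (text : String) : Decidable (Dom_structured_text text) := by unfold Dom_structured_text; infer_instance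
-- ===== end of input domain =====

-- B replaces A's character-by-character accumulating scan by split('\n') + enumerate over
-- whole line segments (simpler decomposition); the dict is returned as an association list.

-- ===== PORT A =====
-- A iterates over the characters of text, accumulating the current line w; on '\n' it stores
-- the line under the next integer key (keys 0,1,2,… are always fresh, so dict insertion = append).
-- one iteration of A's for-loop over a character
def stepA (st : List (Int × String) × Int × List Char) (c : Char) :
    List (Int × String) × Int × List Char :=
  let w' := st.2.2 ++ [c]
  if c = '\n' then (st.1 ++ [(st.2.1, String.ofList w')], st.2.1 + 1, [])
  else (st.1, st.2.1, w')

def structured_text (text : String) : List (Int × String) :=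
  (text.toList.foldl stepA ([], 0, [])).1

-- ===== PORT B =====
def structured_text_alt (text : String) : List (Int × String) :=
  (PySem.List.enumerate
      (PySem.List.slice (PySem.Chars.splitOn text.toList ['\n']) none (some (-1))) 0).map
    (fun p => (p.1, String.ofList (p.2 ++ ['\n'])))

-- ===== PRECONDITION & SPEC =====
def Spec_structured_text (text : String) (out : List (Int × String)) : Prop := out = structured_text_alt text
instance (text : String) (out : List (Int × String)) : Decidable (Spec_structured_text text out) := by unfold Spec_structured_text; infer_instance

-- ===== CLAIM (what is proved, stated in full; the proofs are below) =====
def Claim_equal_structured_text : Prop := ∀ (text : String), Dom_structured_text text → Spec_structured_text text (structured_text text)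

-- ===== LEMMAS AND PROOFS =====

-- structural reference for splitting on '\n'
def splitNL : List Char → List (List Char)
  | [] => [[]]
  | c :: rest =>
    if c = '\n' then [] :: splitNL rest
    else
      match splitNL rest with
      | [] => [[c]]
      | p :: ps => (c :: p) :: ps

theorem splitNL_ne_nil (l : List Char) : splitNL l ≠ [] := by
  cases l with
  | nil => simp [splitNL]
  | cons c rest =>
    simp only [splitNL]
    split
    · simp
    · split <;> simp

theorem splitNL_no_newline (w : List Char) (h : '\n' ∉ w) : splitNL w = [w] := by
  induction w with
  | nil => rfl
  | cons c rest ih =>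
    simp only [List.mem_cons, not_or] at h
    simp [splitNL, Ne.symm h.1, ih h.2]

theorem splitNL_append_newline (w cs : List Char) (h : '\n' ∉ w) :
    splitNL (w ++ '\n' :: cs) = w :: splitNL cs := by
  induction w with
  | nil => simp [splitNL]
  | cons a w ih =>
    simp only [List.mem_cons, not_or] at h
    simp [splitNL, Ne.symm h.1, ih h.2]

theorem splitOn_go_eq (l : List Char) : ∀ (cur : List Char) (acc : List (List Char)),
    PySem.Chars.splitOn.go ['\n'] (l.length + 1) l cur acc
      = acc.reverse ++ (cur.reverse ++ (splitNL l).headI) :: (splitNL l).tail := by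
  induction l with
  | nil => intro cur acc; simp [PySem.Chars.splitOn.go, splitNL]
  | cons c rest ih =>
    intro cur acc
    rw [PySem.Chars.splitOn.go]
    by_cases hc : c = '\n'
    · subst hc
      have hpre : List.isPrefixOf ['\n'] ('\n' :: rest) = true := by
        simp [List.isPrefixOf]
      simp only [List.length_cons, hpre, if_pos, List.drop_succ_cons, List.length_nil,
        List.drop_zero]
      rw [ih]
      rcases hsp : splitNL rest with _ | ⟨p, ps⟩
      · exact absurd hsp (splitNL_ne_nil rest)
      · simp [splitNL, hsp]
    · have hpre : List.isPrefixOf ['\n'] (c :: rest) = false := by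
        simp [List.isPrefixOf, Ne.symm hc]
      simp only [List.length_cons, hpre, Bool.false_eq_true, if_neg, not_false_iff]
      rw [ih]
      rcases hsp : splitNL rest with _ | ⟨p, ps⟩
      · exact absurd hsp (splitNL_ne_nil rest)
      · simp [splitNL, hc, hsp]

theorem splitOn_eq_splitNL (l : List Char) : PySem.Chars.splitOn l ['\n'] = splitNL l := by
  rw [PySem.Chars.splitOn, splitOn_go_eq]
  rcases hsp : splitNL l with _ | ⟨p, ps⟩
  · exact absurd hsp (splitNL_ne_nil l)
  · simp

theorem foldl_stepA_key (cs : List Char) : ∀ (lines : List (Int × String)) (i : Int)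
    (w : List Char), '\n' ∉ w →
    (cs.foldl stepA (lines, i, w)).1
      = lines ++ (PySem.List.enumerate (splitNL (w ++ cs)).dropLast i).map
          (fun p => (p.1, String.ofList (p.2 ++ ['\n']))) := by
  induction cs with
  | nil =>
    intro lines i w hw
    simp [splitNL_no_newline w hw, PySem.List.enumerate_nil]
  | cons c cs ih =>
    intro lines i w hw
    by_cases hc : c = '\n'
    · subst hc
      have h1 : stepA (lines, i, w) '\n' = (lines ++ [(i, String.ofList (w ++ ['\n']))], i + 1, []) := by
        simp [stepA]
      rw [List.foldl_cons, h1, ih _ _ [] (by simp)]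
      rw [show w ++ '\n' :: cs = w ++ '\n' :: ([] ++ cs) by simp,
        splitNL_append_newline w _ hw]
      rw [List.dropLast_cons_of_ne_nil (splitNL_ne_nil _), PySem.List.enumerate_cons]
      simp
    · have h1 : stepA (lines, i, w) c = (lines, i, w ++ [c]) := by
        simp [stepA, hc]
      rw [List.foldl_cons, h1, ih _ _ (w ++ [c]) (by simp [hw, Ne.symm hc]),
        List.append_assoc]
      simp

-- ===== VERDICT (by name: the statement is the Claim_ definition above) =====
theorem structured_text_spec : Claim_equal_structured_text := by
  intro text _
  unfold Spec_structured_text structured_text structured_text_alt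
  rw [foldl_stepA_key text.toList [] 0 [] (by simp)]
  rw [splitOn_eq_splitNL, PySem.List.slice_to_neg_one]
  simp
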